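-- pv_equiv track=rewrite | github.com/paulbrodersen/netgraph | netgraph/_node_layout.py | _is_complete_bipartite
-- ===== SOURCE A (Python) =====
-- from itertools import combinations, product
--
-- def _is_complete_bipartite(edges, left, right):
--     """Check if the bipartite graph is fully connected."""
--     minimal_complete_graph = list(product(left, right))
--
--     if len(edges) < len(minimal_complete_graph):
--         return False
--
--     for edge in minimal_complete_graph:
--         if (edge not in edges) and (edge[::-1] not in edges):
--             return False
--
--     return True
-- ===== SOURCE B (Python) =====
-- def _is_complete_bipartite(edges, left, right):
--     """Check if the bipartite graph is fully connected."""
--     if len(edges) < len(left) * len(right):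
--         return False
--     missing = {(l, r) for l in left for r in right}
--     for e in edges:
--         missing.discard((e[0], e[1]))
--         missing.discard((e[1], e[0]))
--     return not missing
-- ===== Notes on version B (the rewrite author's own statement) =====
-- stated objective: faster
-- what changed: Inverts the traversal: instead of scanning the whole edge list once per (left,right) pair, B builds the set of required pairs and makes a single pass over edges deleting each edge's two orientations from it, returning True iff nothing remains missing.
import Mathlib
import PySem

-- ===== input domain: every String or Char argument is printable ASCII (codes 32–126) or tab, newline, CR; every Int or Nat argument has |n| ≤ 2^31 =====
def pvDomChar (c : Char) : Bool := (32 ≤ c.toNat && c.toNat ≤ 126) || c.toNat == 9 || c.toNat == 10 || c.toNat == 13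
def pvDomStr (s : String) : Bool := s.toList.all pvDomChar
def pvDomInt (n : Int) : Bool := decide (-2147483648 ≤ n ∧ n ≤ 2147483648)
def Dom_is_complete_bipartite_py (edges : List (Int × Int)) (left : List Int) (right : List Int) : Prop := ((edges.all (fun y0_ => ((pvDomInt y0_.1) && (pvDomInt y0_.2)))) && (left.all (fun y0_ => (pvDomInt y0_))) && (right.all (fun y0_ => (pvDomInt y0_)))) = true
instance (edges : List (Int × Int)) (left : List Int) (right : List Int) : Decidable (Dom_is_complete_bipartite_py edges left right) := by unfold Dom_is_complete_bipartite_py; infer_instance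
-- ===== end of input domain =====

-- B inverts the traversal: one pass over edges deletes each edge's two orientations from the
-- set of required (left,right) pairs, and the answer is whether that set is empty (objective: faster).

-- ===== PORT A =====
-- literal transliteration of _is_complete_bipartite: build product(left, right),
-- length guard, then scan the pairs, returning False on the first uncovered pair.
def is_complete_bipartite_py (edges : List (Int × Int)) (left : List Int) (right : List Int) : Bool :=
  let minimal_complete_graph := left.flatMap (fun l => right.map (fun r => (l, r)))
  if edges.length < minimal_complete_graph.length then false
  else
    minimal_complete_graph.all (fun edge =>
      if !(decide (edge ∈ edges)) && !(decide ((edge.2, edge.1) ∈ edges)) then false else true)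

-- ===== PORT B =====
-- missing.discard((e[0], e[1])); missing.discard((e[1], e[0]))
def pvDropEdge (s : PySem.Set (Int × Int)) (e : Int × Int) : PySem.Set (Int × Int) :=
  PySem.Set.discard (PySem.Set.discard s (e.1, e.2)) (e.2, e.1)

def is_complete_bipartite_py_alt (edges : List (Int × Int)) (left : List Int) (right : List Int) : Bool :=
  if edges.length < left.length * right.length then false
  else
    let missing : PySem.Set (Int × Int) :=
      PySem.Set.ofList (left.flatMap (fun l => right.map (fun r => (l, r))))
    (edges.foldl pvDropEdge missing).isEmpty

-- ===== PRECONDITION & SPEC =====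
def Spec_is_complete_bipartite_py (edges : List (Int × Int)) (left : List Int) (right : List Int) (out : Bool) : Prop := out = is_complete_bipartite_py_alt edges left right
instance (edges : List (Int × Int)) (left : List Int) (right : List Int) (out : Bool) : Decidable (Spec_is_complete_bipartite_py edges left right out) := by unfold Spec_is_complete_bipartite_py; infer_instance

-- ===== CLAIM (what is proved, stated in full; the proofs are below) =====
def Claim_equal_is_complete_bipartite_py : Prop := ∀ (edges : List (Int × Int)) (left : List Int) (right : List Int), Dom_is_complete_bipartite_py edges left right → Spec_is_complete_bipartite_py edges left right (is_complete_bipartite_py edges left right)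

-- ===== LEMMAS AND PROOFS =====

-- membership after the deletion pass: p survives iff it was there and no edge covers it
lemma pvFold_mem (edges : List (Int × Int)) (s : PySem.Set (Int × Int)) (p : Int × Int) :
    p ∈ edges.foldl pvDropEdge s ↔
      p ∈ s ∧ ∀ e ∈ edges, p ≠ (e.1, e.2) ∧ p ≠ (e.2, e.1) := by
  induction edges generalizing s with
  | nil => simp
  | cons e rest ih =>
      simp only [List.foldl_cons, ih, pvDropEdge, PySem.Set.mem_discard, List.mem_cons]
      constructor
      · rintro ⟨⟨⟨h, h1⟩, h2⟩, h3⟩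
        exact ⟨h, by rintro f (rfl | hf); exact ⟨h1, h2⟩; exact h3 f hf⟩
      · rintro ⟨h, hall⟩
        exact ⟨⟨⟨h, (hall e (Or.inl rfl)).1⟩, (hall e (Or.inl rfl)).2⟩,
               fun f hf => hall f (Or.inr hf)⟩

lemma pv_mcg_length (left right : List Int) :
    (left.flatMap (fun l => right.map (fun r => (l, r)))).length = left.length * right.length := by
  induction left with
  | nil => simp
  | cons l t ih => simp [List.flatMap_cons, ih, Nat.succ_mul, Nat.add_comm]

-- ===== VERDICT (by name: the statement is the Claim_ definition above) =====
theorem is_complete_bipartite_py_spec : Claim_equal_is_complete_bipartite_py := by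
  intro edges left right _
  show is_complete_bipartite_py edges left right = is_complete_bipartite_py_alt edges left right
  simp only [is_complete_bipartite_py, is_complete_bipartite_py_alt, pv_mcg_length]
  split_ifs with h
  · rfl
  · rw [Bool.eq_iff_iff]
    simp only [List.all_eq_true, List.isEmpty_iff, List.eq_nil_iff_forall_not_mem,
      pvFold_mem, PySem.Set.mem_ofList]
    constructor
    · rintro hA p ⟨hp, hcov⟩
      have := hA p hp
      simp only [Bool.and_eq_true, Bool.not_eq_true', decide_eq_false_iff_not] at this
      by_cases h1 : p ∈ edges
      · exact (hcov p h1).1 rfl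
      · by_cases h2 : (p.2, p.1) ∈ edges
        · exact (hcov _ h2).2 rfl
        · simp [h1, h2] at this
    · intro hB p hp
      by_cases h1 : p ∈ edges
      · simp [h1]
      · by_cases h2 : (p.2, p.1) ∈ edges
        · simp [h2]
        · exfalso
          exact hB p ⟨hp, by
            rintro e he
            constructor
            · rintro rfl; exact h1 he
            · rintro rfl; exact h2 he⟩
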